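-- pv_equiv track=rewrite | github.com/HelloMinchan/problem-solving | ThisIsCodingTest/22.01.05/무지의 먹방 라이브.py | solution
-- ===== SOURCE A (Python) =====
-- import heapq
--
-- def solution(food_times, stop_time):
--     food_heapq = []
--
--     for number, food_time in enumerate(food_times):
--         heapq.heappush(food_heapq, (food_time, number + 1))
--
--     food_heapq_length = len(food_heapq)
--     pre_food_time = 0
--
--     while food_heapq:
--         if ((food_heapq[0][0] - pre_food_time) * food_heapq_length) <= stop_time:
--             food_time, number = heapq.heappop(food_heapq)
--             stop_time -= (food_time - pre_food_time) * food_heapq_length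
--             food_heapq_length -= 1
--             pre_food_time = food_time
--         else:
--             stop_time = stop_time % food_heapq_length
--             return sorted(food_heapq, key = lambda el:el[1])[stop_time][1]
--
--     if not food_heapq:
--         return -1
--     else:
--         return sorted(food_heapq, key = lambda el:el[1])[0][1]
-- ===== SOURCE B (Python) =====
-- def solution(food_times, stop_time):
--     # Parametric (binary) search on the "eaten level" t: after eating optimally for
--     # sum(min(f, t)) seconds, every food is reduced to max(f - t, 0).  Find the largest
--     # t with sum(min(f, t)) <= stop_time; the next bite lands on the r-th surviving food
--     # (r = leftover seconds), counted in index order.  No heap, no sorting.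
--     if not food_times or sum(food_times) <= stop_time:
--         return -1
--     n = len(food_times)
--     lo = stop_time // n          # sum(min(f, lo)) <= n*lo <= stop_time
--     hi = max(food_times)         # sum(min(f, hi)) = sum(food_times) > stop_time
--     while hi - lo > 1:
--         mid = (lo + hi) // 2
--         if sum(min(f, mid) for f in food_times) <= stop_time:
--             lo = mid
--         else:
--             hi = mid
--     r = stop_time - sum(min(f, lo) for f in food_times)
--     for i, f in enumerate(food_times):
--         if f > lo:
--             if r == 0:
--                 return i + 1
--             r -= 1
-- ===== Notes on version B (the rewrite author's own statement) =====
-- stated objective: alternative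
-- what changed: Replaces the heap-driven greedy consumption with a parametric binary search for the largest eaten level t with sum(min(f,t)) <= stop_time, followed by one index-order scan that picks the r-th surviving food; no heap and no sorting at all.
import Mathlib
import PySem

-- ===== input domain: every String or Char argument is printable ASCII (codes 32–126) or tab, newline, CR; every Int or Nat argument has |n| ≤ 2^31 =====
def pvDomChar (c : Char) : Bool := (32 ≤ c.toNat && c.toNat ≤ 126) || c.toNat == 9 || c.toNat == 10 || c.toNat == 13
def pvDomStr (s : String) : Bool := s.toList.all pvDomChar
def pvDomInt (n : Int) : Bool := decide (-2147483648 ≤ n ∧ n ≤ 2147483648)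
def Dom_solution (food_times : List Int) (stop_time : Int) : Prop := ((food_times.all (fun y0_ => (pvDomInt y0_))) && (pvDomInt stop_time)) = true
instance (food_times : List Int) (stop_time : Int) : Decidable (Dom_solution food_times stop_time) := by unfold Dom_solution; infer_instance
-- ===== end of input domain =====

-- B replaces A's heap-driven greedy with a parametric binary search for the largest
-- fully-eaten level t (sum(min(f,t)) <= stop_time) plus one index-order scan (objective: alternative).

-- ===== PORT A =====
-- Python's tuple comparison (t1, n1) < (t2, n2)
def pvTupleLt (a b : Int × Int) : Bool :=
  decide (a.1 < b.1) || (decide (a.1 = b.1) && decide (a.2 < b.2))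

-- heapq is modeled observationally as an ascending sorted list under tuple '<':
-- heappush = ordered insert, heappop = take the front, heap[0] = the front.  This is exact here:
-- the program only observes heap[0], the pop order and sorted(heap, key=el[1]), all of which
-- depend only on the heap's contents and the tuple order.
def solutionLoop (food_heapq : List (Int × Int)) (food_heapq_length : Int)
    (pre_food_time stop_time : Int) : Int :=
  match food_heapq with
  | [] => -1   -- the while loop exits only with an empty heap; Python then returns -1
  | (food_time, number) :: rest =>
    if (food_time - pre_food_time) * food_heapq_length ≤ stop_time then
      solutionLoop rest (food_heapq_length - 1) food_time
        (stop_time - (food_time - pre_food_time) * food_heapq_length)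
    else
      (PySem.List.pyGetD
        (PySem.List.sorted ((food_time, number) :: rest) (fun el => el.2) false)
        (PySem.Int.mod stop_time food_heapq_length) (0, 0)).2

def solution (food_times : List Int) (stop_time : Int) : Int :=
  let food_heapq := (PySem.List.enumerate food_times).foldl
    (fun h p => PySem.List.insertBy pvTupleLt (p.2, p.1 + 1) h) []
  solutionLoop food_heapq (food_heapq.length : Int) 0 stop_time

-- ===== PORT B =====
-- sum(min(f, t) for f in food_times)
def pvSumMin (food_times : List Int) (t : Int) : Int :=
  (food_times.map (fun f => min f t)).sum

-- the 'while hi - lo > 1' binary-search loop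
def pvBSearch (food_times : List Int) (stop_time lo hi : Int) : Int :=
  if _hgap : 1 < hi - lo then
    let mid := PySem.Int.floordiv (lo + hi) 2
    if pvSumMin food_times mid ≤ stop_time then pvBSearch food_times stop_time mid hi
    else pvBSearch food_times stop_time lo mid
  else lo
termination_by (hi - lo).toNat
decreasing_by
  all_goals
    have h2 := PySem.Int.floordiv_eq_ediv_of_pos (a := lo + hi) (b := 2) (by norm_num)
    simp only [mid, h2] at *
    omega

-- the final 'for i, f in enumerate(food_times)' selection loop
def pvPickScan (pairs : List (Int × Int)) (t r : Int) : Int :=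
  match pairs with
  | [] => 0    -- unreachable when called by solution_alt: r < number of foods above level t
  | (i, f) :: rest =>
    if t < f then (if r = 0 then i + 1 else pvPickScan rest t (r - 1))
    else pvPickScan rest t r

def solution_alt (food_times : List Int) (stop_time : Int) : Int :=
  if food_times = [] ∨ food_times.sum ≤ stop_time then -1
  else
    let n : Int := (food_times.length : Int)
    let lo := pvBSearch food_times stop_time (PySem.Int.floordiv stop_time n)
      ((PySem.List.max? food_times (fun x => x)).getD 0)
    let r := stop_time - pvSumMin food_times lo
    pvPickScan (PySem.List.enumerate food_times) lo r

-- ===== PRECONDITION & SPEC =====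
def Spec_solution (food_times : List Int) (stop_time : Int) (out : Int) : Prop := out = solution_alt food_times stop_time
instance (food_times : List Int) (stop_time : Int) (out : Int) : Decidable (Spec_solution food_times stop_time out) := by unfold Spec_solution; infer_instance

-- ===== CLAIM (what is proved, stated in full; the proofs are below) =====
def Claim_equal_solution : Prop := ∀ (food_times : List Int) (stop_time : Int), Dom_solution food_times stop_time → Spec_solution food_times stop_time (solution food_times stop_time)

-- ===== LEMMAS AND PROOFS =====

-- value sum of a pair list cut off at level t
def pvVSum (h : List (Int × Int)) (t : Int) : Int := (h.map (fun p => min p.1 t)).sum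

-- the expression A returns when its loop stops with heap h at level t and leftover r
def pvTailExpr (h : List (Int × Int)) (t r : Int) : Int :=
  (PySem.List.pyGetD
    (PySem.List.sorted (h.filter (fun x => decide (t < x.1))) (fun e => e.2) false)
    r (0, 0)).2

-- the (value, index+1) pairs A pushes, in push order
def pvPairs (ft : List Int) : List (Int × Int) :=
  (PySem.List.enumerate ft).map (fun p => (p.2, p.1 + 1))

lemma pvSumMin_mono (ft : List Int) {t t' : Int} (h : t ≤ t') :
    pvSumMin ft t ≤ pvSumMin ft t' :=
  List.sum_le_sum (fun _ _ => min_le_min le_rfl h)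

lemma pvSumMin_le (ft : List Int) (t : Int) :
    pvSumMin ft t ≤ (ft.length : Int) * t := by
  induction ft with
  | nil => simp [pvSumMin]
  | cons f rest ih =>
    simp only [pvSumMin, List.map_cons, List.sum_cons, List.length_cons] at *
    push_cast
    have h1 : min f t ≤ t := min_le_right f t
    nlinarith

lemma pvSumMin_eq_sum (ft : List Int) (t : Int) (h : ∀ f ∈ ft, f ≤ t) :
    pvSumMin ft t = ft.sum := by
  unfold pvSumMin
  rw [show ft.map (fun f => min f t) = ft.map id from List.map_congr_left
    (fun f hf => min_eq_left (h f hf))]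
  simp

lemma pvSumMin_succ (ft : List Int) (t : Int) :
    pvSumMin ft (t + 1) = pvSumMin ft t + (ft.countP (fun f => decide (t < f)) : Int) := by
  induction ft with
  | nil => simp [pvSumMin]
  | cons f rest ih =>
    simp only [pvSumMin, List.map_cons, List.sum_cons, List.countP_cons] at *
    by_cases hf : t < f
    · have h1 : min f (t + 1) = min f t + 1 := by
        rcases le_total f t with h' | h' <;> simp [min_def] <;> omega
      rw [h1]
      simp [hf]
      omega
    · have h1 : min f (t + 1) = min f t := by
        rcases le_total f t with h' | h' <;> simp [min_def] <;> omega
      rw [h1]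
      simp [hf]
      omega

lemma pvVSum_mono (h : List (Int × Int)) {t t' : Int} (ht : t ≤ t') :
    pvVSum h t ≤ pvVSum h t' :=
  List.sum_le_sum (fun _ _ => min_le_min le_rfl ht)

lemma sum_fst_ge (l : List (Int × Int)) (v : Int) (h : ∀ x ∈ l, v ≤ x.1) :
    (l.length : Int) * v ≤ (l.map (fun p => p.1)).sum := by
  induction l with
  | nil => simp
  | cons x rest ih =>
    simp only [List.map_cons, List.sum_cons, List.length_cons]
    push_cast
    have h1 := h x (List.mem_cons_self)
    have h2 := ih (fun y hy => h y (List.mem_cons_of_mem _ hy))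
    nlinarith

lemma pvVSum_const (l : List (Int × Int)) (t : Int) (h : ∀ x ∈ l, t ≤ x.1) :
    pvVSum l t = (l.length : Int) * t := by
  induction l with
  | nil => simp [pvVSum]
  | cons x rest ih =>
    have h1 : min x.1 t = t := min_eq_right (h x (List.mem_cons_self))
    simp only [pvVSum, List.map_cons, List.sum_cons, List.length_cons] at *
    rw [h1, ih (fun y hy => h y (List.mem_cons_of_mem _ hy))]
    push_cast; ring

lemma insertBy_pairwise (x : Int × Int) (l : List (Int × Int))
    (hl : l.Pairwise (fun a b => a.1 ≤ b.1)) :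
    (PySem.List.insertBy pvTupleLt x l).Pairwise (fun a b => a.1 ≤ b.1) := by
  induction l with
  | nil => simp [PySem.List.insertBy]
  | cons y ys ih =>
    rw [List.pairwise_cons] at hl
    rw [PySem.List.insertBy]
    by_cases hc : pvTupleLt x y = true
    · rw [if_pos hc]
      have hxy : x.1 ≤ y.1 := by
        simp [pvTupleLt] at hc
        rcases hc with h | h
        · exact le_of_lt h
        · exact le_of_eq h.1
      refine List.pairwise_cons.mpr ⟨?_, List.pairwise_cons.mpr ⟨hl.1, hl.2⟩⟩
      intro z hz
      rcases List.mem_cons.mp hz with rfl | hz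
      · exact hxy
      · exact le_trans hxy (hl.1 z hz)
    · rw [if_neg hc]
      have hyx : y.1 ≤ x.1 := by
        simp [pvTupleLt] at hc
        omega
      refine List.pairwise_cons.mpr ⟨?_, ih hl.2⟩
      intro z hz
      rcases (PySem.List.mem_insertBy _ _ _ _).mp hz with rfl | hz
      · exact hyx
      · exact hl.1 z hz

lemma foldl_insertBy_perm (l : List (Int × Int)) :
    ∀ acc, (l.foldl (fun h x => PySem.List.insertBy pvTupleLt x h) acc).Perm (l ++ acc) := by
  induction l with
  | nil => intro acc; simp
  | cons x xs ih =>
    intro acc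
    simp only [List.foldl_cons, List.cons_append]
    exact ((ih _).trans
      (((PySem.List.insertBy_perm pvTupleLt x acc).append_left xs).trans List.perm_middle))

lemma foldl_insertBy_pairwise (l : List (Int × Int)) :
    ∀ acc, acc.Pairwise (fun a b => a.1 ≤ b.1) →
    (l.foldl (fun h x => PySem.List.insertBy pvTupleLt x h) acc).Pairwise
      (fun a b => a.1 ≤ b.1) := by
  induction l with
  | nil => intro acc h; simpa using h
  | cons x xs ih =>
    intro acc h
    simp only [List.foldl_cons]
    exact ih _ (insertBy_pairwise x acc h)

-- A's sequence of heappushes builds (a permutation of) the pair list, as B sees it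
lemma build_eq (ft : List Int) :
    (PySem.List.enumerate ft).foldl
      (fun h p => PySem.List.insertBy pvTupleLt (p.2, p.1 + 1) h) []
    = (pvPairs ft).foldl (fun h x => PySem.List.insertBy pvTupleLt x h) [] := by
  rw [pvPairs, List.foldl_map]

lemma pairs_map_sum (ft : List Int) (φ : Int → Int) :
    ((pvPairs ft).map (fun p => φ p.1)).sum = (ft.map φ).sum := by
  unfold pvPairs
  rw [List.map_map]
  rw [show ((fun p => φ p.1) ∘ (fun p : Int × Int => (p.2, p.1 + 1)))
      = (fun p : Int × Int => φ p.2) from rfl]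
  rw [show (fun p : Int × Int => φ p.2) = φ ∘ (fun p : Int × Int => p.2) from rfl,
    ← List.map_map, PySem.List.map_snd_enumerate]

lemma loop_done (h : List (Int × Int)) (pre s : Int)
    (hs : h.Pairwise (fun a b => a.1 ≤ b.1))
    (htot : (h.map (fun p => p.1)).sum - (h.length : Int) * pre ≤ s) :
    solutionLoop h (h.length : Int) pre s = -1 := by
  induction h generalizing pre s with
  | nil => simp [solutionLoop]
  | cons x rest ih =>
    obtain ⟨v, i⟩ := x
    rw [List.pairwise_cons] at hs
    have hrest : ((rest.length : Int)) * v ≤ (rest.map (fun p => p.1)).sum :=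
      sum_fst_ge rest v hs.1
    simp only [List.map_cons, List.sum_cons, List.length_cons] at htot
    have hc : (v - pre) * ((rest.length + 1 : Nat) : Int) ≤ s := by push_cast at *; nlinarith
    rw [solutionLoop, if_pos (by exact_mod_cast hc)]
    have hlen : (((v, i) :: rest).length : Int) - 1 = (rest.length : Int) := by
      push_cast [List.length_cons]; ring
    rw [hlen, show s - (v - pre) * ((((v, i) :: rest).length : Nat) : Int)
        = s - (v - pre) * ((rest.length + 1 : Nat) : Int) by simp]
    refine ih v _ hs.2 ?_
    push_cast at *
    nlinarith

lemma loop_fail (h : List (Int × Int)) (pre s t : Int)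
    (hs : h.Pairwise (fun a b => a.1 ≤ b.1))
    (htot : ¬ ((h.map (fun p => p.1)).sum - (h.length : Int) * pre ≤ s))
    (h1 : pvVSum h t - (h.length : Int) * pre ≤ s)
    (h2 : ¬ (pvVSum h (t + 1) - (h.length : Int) * pre ≤ s)) :
    solutionLoop h (h.length : Int) pre s
      = pvTailExpr h t (s - (pvVSum h t - (h.length : Int) * pre)) := by
  induction h generalizing pre s with
  | nil => simp [pvVSum] at htot h1; omega
  | cons x rest ih =>
    obtain ⟨v, i⟩ := x
    rw [List.pairwise_cons] at hs
    have hmem : ∀ y ∈ (v, i) :: rest, v ≤ y.1 := by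
      intro y hy
      rcases List.mem_cons.mp hy with rfl | hy
      · exact le_rfl
      · exact hs.1 y hy
    set L : Int := (((v, i) :: rest).length : Int) with hL
    have hLpos : (1 : Int) ≤ L := by rw [hL]; push_cast [List.length_cons]; omega
    have hLrest : L = (rest.length : Int) + 1 := by rw [hL]; push_cast [List.length_cons]; ring
    by_cases hc : (v - pre) * L ≤ s
    · -- head consumed: v ≤ t, recurse
      have hvt : v ≤ t := by
        by_contra hvt
        apply h2
        have hm := pvVSum_mono ((v, i) :: rest) (by omega : t + 1 ≤ v)
        rw [pvVSum_const _ v hmem, ← hL] at hm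
        nlinarith
      rw [solutionLoop, if_pos (by exact_mod_cast hc)]
      have hfilter : ((v, i) :: rest).filter (fun x => decide (t < x.1))
          = rest.filter (fun x => decide (t < x.1)) := by
        rw [List.filter_cons]
        simp [show ¬ t < v by omega]
      have hv1 : pvVSum ((v, i) :: rest) t = v + pvVSum rest t := by
        simp [pvVSum, min_eq_left hvt]
      have hv2 : pvVSum ((v, i) :: rest) (t + 1) = v + pvVSum rest (t + 1) := by
        simp [pvVSum, min_eq_left (by omega : v ≤ t + 1)]
      have hsum : (((v, i) :: rest).map (fun p => p.1)).sum
          = v + (rest.map (fun p => p.1)).sum := by simp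
      rw [show L - 1 = ((rest.length : Nat) : Int) by rw [hLrest]; ring]
      rw [ih v (s - (v - pre) * L) hs.2
        (by intro hcon; apply htot; rw [hsum, hLrest]; rw [hLrest] at hcon; nlinarith)
        (by rw [hv1, hLrest] at h1; rw [hLrest]; nlinarith)
        (by intro hcon; apply h2; rw [hv2, hLrest]; rw [hLrest] at hcon; nlinarith)]
      unfold pvTailExpr
      rw [hfilter]
      have harg : s - (v - pre) * L - (pvVSum rest t - (rest.length : Int) * v)
          = s - (pvVSum ((v, i) :: rest) t - L * pre) := by
        rw [hv1, hLrest]; ring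
      rw [harg]
    · -- the loop stops here: t < v, every element survives
      have hvt : t < v := by
        by_contra hvt
        rw [not_lt] at hvt
        apply hc
        have hm := pvVSum_mono ((v, i) :: rest) hvt
        rw [pvVSum_const _ v hmem, ← hL] at hm
        nlinarith
      have hconst : pvVSum ((v, i) :: rest) t = L * t :=
        pvVSum_const _ t (fun y hy => le_trans (by omega) (hmem y hy))
      have hconst1 : pvVSum ((v, i) :: rest) (t + 1) = L * (t + 1) := by
        by_cases htv1 : t + 1 ≤ v
        · exact pvVSum_const _ (t + 1) (fun y hy => le_trans htv1 (hmem y hy))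
        · omega
      have hfilter : ((v, i) :: rest).filter (fun x => decide (t < x.1))
          = (v, i) :: rest :=
        List.filter_eq_self.mpr (fun y hy => decide_eq_true (lt_of_lt_of_le hvt (hmem y hy)))
      rw [solutionLoop, if_neg (by exact_mod_cast hc)]
      have hr0 : 0 ≤ s - (L * t - L * pre) := by rw [hconst] at h1; linarith
      have hrL : s - (L * t - L * pre) < L := by
        have h2' : s < pvVSum ((v, i) :: rest) (t + 1) - L * pre := by omega
        rw [hconst1] at h2'
        nlinarith
      have hmod : PySem.Int.mod s L = s - (L * t - L * pre) := by
        rw [PySem.Int.mod_eq_emod_of_pos (by omega)]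
        have h' : s % L = ((s - (L * t - L * pre)) + L * (t - pre)) % L := by ring_nf
        rw [h', Int.add_mul_emod_self_left, Int.emod_eq_of_lt hr0 hrL]
      unfold pvTailExpr
      rw [hfilter, hconst, hmod]

lemma bsearch_spec (ft : List Int) (st : Int) :
    ∀ (n : Nat) (lo hi : Int), (hi - lo).toNat ≤ n →
      pvSumMin ft lo ≤ st → ¬ pvSumMin ft hi ≤ st →
      pvSumMin ft (pvBSearch ft st lo hi) ≤ st ∧
        ¬ pvSumMin ft (pvBSearch ft st lo hi + 1) ≤ st := by
  intro n
  induction n with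
  | zero =>
    intro lo hi hn hlo hhi
    exfalso
    have : lo < hi := by
      by_contra hcon
      exact hhi (le_trans (pvSumMin_mono ft (by omega)) hlo)
    omega
  | succ n ih =>
    intro lo hi hn hlo hhi
    have hlohi : lo < hi := by
      by_contra hcon
      exact hhi (le_trans (pvSumMin_mono ft (by omega)) hlo)
    rw [pvBSearch]
    by_cases hgap : 1 < hi - lo
    · rw [dif_pos hgap]
      have hmid : PySem.Int.floordiv (lo + hi) 2 = (lo + hi) / 2 :=
        PySem.Int.floordiv_eq_ediv_of_pos (by norm_num)
      simp only [hmid]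
      by_cases hc : pvSumMin ft ((lo + hi) / 2) ≤ st
      · rw [if_pos hc]
        exact ih _ hi (by omega) hc hhi
      · rw [if_neg hc]
        exact ih lo _ (by omega) hlo hc
    · rw [dif_neg hgap]
      have : hi = lo + 1 := by omega
      exact ⟨hlo, this ▸ hhi⟩

lemma pick_eq (l : List Int) :
    ∀ (s t : Int) (k : Nat), k < l.countP (fun f => decide (t < f)) →
      pvPickScan (PySem.List.enumerate l s) t (k : Int)
        = (PySem.List.pyGetD
            (((PySem.List.enumerate l s).map (fun p => (p.2, p.1 + 1))).filter
              (fun x => decide (t < x.1)))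
            (k : Int) (0, 0)).2 := by
  induction l with
  | nil => intro s t k hk; simp at hk
  | cons f rest ih =>
    intro s t k hk
    rw [PySem.List.enumerate_cons]
    simp only [List.map_cons, List.filter_cons, List.countP_cons] at *
    by_cases hf : t < f
    · simp only [hf, decide_true, if_pos]
      rw [pvPickScan]
      rw [if_pos hf]
      by_cases hk0 : k = 0
      · subst hk0
        simp [PySem.List.pyGetD]
      · rw [if_neg (by exact_mod_cast hk0)]
        have hk1 : ((k : Int)) - 1 = ((k - 1 : Nat) : Int) := by omega
        rw [hk1, ih (s + 1) t (k - 1) (by simp [hf] at hk; omega)]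
        rw [PySem.List.pyGetD_natCast, PySem.List.pyGetD_natCast]
        rcases Nat.exists_eq_succ_of_ne_zero hk0 with ⟨m, rfl⟩
        simp [List.getD]
    · simp only [hf, decide_false, Bool.false_eq_true]
      rw [pvPickScan, if_neg hf]
      exact ih (s + 1) t k (by simp [hf] at hk; omega)

-- sorting A's surviving heap by food number undoes the value sort: the survivors
-- reappear in their original (index) order
lemma sorted_filter_eq (ft : List Int) (ys : List (Int × Int)) (t : Int)
    (hperm : ys.Perm (pvPairs ft)) :
    PySem.List.sorted (ys.filter (fun x => decide (t < x.1))) (fun e => e.2) false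
      = (pvPairs ft).filter (fun x => decide (t < x.1)) := by
  apply PySem.List.sorted_eq_of_perm_of_pairwise_lt
  · exact (hperm.filter _).symm
  · have hp : (pvPairs ft).Pairwise (fun a b : Int × Int => a.2 < b.2) := by
      unfold pvPairs
      refine List.Pairwise.map _ ?_ (PySem.List.pairwise_lt_enumerate (xs := ft) (s := 0))
      intro a b hab
      show a.1 + 1 < b.1 + 1
      omega
    exact hp.filter _

-- ===== VERDICT (by name: the statement is the Claim_ definition above) =====
theorem solution_spec : Claim_equal_solution := by
  unfold Claim_equal_solution
  intro ft st _
  unfold Spec_solution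
  by_cases h0 : ft = [] ∨ ft.sum ≤ st
  · rw [solution_alt, if_pos h0]
    rcases h0 with rfl | hsum
    · rfl
    · rw [solution]
      simp only [build_eq]
      set ys := (pvPairs ft).foldl (fun h x => PySem.List.insertBy pvTupleLt x h) [] with hys
      have hperm : ys.Perm (pvPairs ft) := by
        simpa using foldl_insertBy_perm (pvPairs ft) []
      have hpair : ys.Pairwise (fun a b => a.1 ≤ b.1) :=
        foldl_insertBy_pairwise (pvPairs ft) [] List.Pairwise.nil
      apply loop_done ys 0 st hpair
      have h1 : (ys.map (fun p => p.1)).sum = ft.sum := by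
        rw [(hperm.map _).sum_eq]
        simpa using pairs_map_sum ft id
      rw [h1]
      simpa using hsum
  · rw [not_or] at h0
    obtain ⟨hne, hsum⟩ := h0
    have hnpos : 0 < (ft.length : Int) := by
      cases ft with
      | nil => exact absurd rfl hne
      | cons a l => push_cast [List.length_cons]; omega
    -- the maximum
    obtain ⟨m, hm⟩ : ∃ m, PySem.List.max? ft (fun x => x) = some m := by
      cases hmax : PySem.List.max? ft (fun x => x) with
      | none => exact absurd ((PySem.List.max?_eq_none_iff ft (fun x => x)).mp hmax) hne
      | some m => exact ⟨m, rfl⟩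
    have hmax : ∀ f ∈ ft, f ≤ m := PySem.List.max?_isMax hm
    -- binary-search bracket
    have hlo : pvSumMin ft (PySem.Int.floordiv st (ft.length : Int)) ≤ st := by
      refine le_trans (pvSumMin_le ft _) ?_
      have := (PySem.Int.le_floordiv_iff_mul_le
        (a := st) (b := (ft.length : Int)) (q := PySem.Int.floordiv st (ft.length : Int))
        hnpos).mp le_rfl
      linarith [this]
    have hhi : ¬ pvSumMin ft m ≤ st := by
      rw [pvSumMin_eq_sum ft m hmax]
      exact hsum
    set t := pvBSearch ft st (PySem.Int.floordiv st (ft.length : Int)) m with ht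
    have hspec := bsearch_spec ft st
      ((m - PySem.Int.floordiv st (ft.length : Int)).toNat)
      (PySem.Int.floordiv st (ft.length : Int)) m le_rfl hlo hhi
    rw [← ht] at hspec
    -- leftover seconds
    have hr0 : 0 ≤ st - pvSumMin ft t := by linarith [hspec.1]
    have hrc : st - pvSumMin ft t < (ft.countP (fun f => decide (t < f)) : Int) := by
      have := hspec.2
      rw [pvSumMin_succ] at this
      omega
    -- A's side
    rw [solution]
    simp only [build_eq]
    set ys := (pvPairs ft).foldl (fun h x => PySem.List.insertBy pvTupleLt x h) [] with hys
    have hperm : ys.Perm (pvPairs ft) := by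
      simpa using foldl_insertBy_perm (pvPairs ft) []
    have hpair : ys.Pairwise (fun a b => a.1 ≤ b.1) :=
      foldl_insertBy_pairwise (pvPairs ft) [] List.Pairwise.nil
    have hvsum : ∀ u : Int, pvVSum ys u = pvSumMin ft u := by
      intro u
      unfold pvVSum pvSumMin
      rw [(hperm.map _).sum_eq]
      exact pairs_map_sum ft (fun f => min f u)
    have hfsum : (ys.map (fun p => p.1)).sum = ft.sum := by
      rw [(hperm.map _).sum_eq]
      simpa using pairs_map_sum ft id
    rw [loop_fail ys 0 st t hpair
      (by rw [hfsum]; omega)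
      (by rw [hvsum]; omega)
      (by rw [hvsum]; omega)]
    -- B's side
    rw [solution_alt, if_neg (by rw [not_or]; exact ⟨hne, hsum⟩)]
    simp only [hm, Option.getD_some, ← ht]
    -- both sides pick the same survivor
    unfold pvTailExpr
    rw [sorted_filter_eq ft ys t hperm]
    have hk : ((st - pvSumMin ft t).toNat : Int) = st - pvSumMin ft t := by omega
    rw [show st - (pvVSum ys t - (ys.length : Int) * 0) = st - pvSumMin ft t by
          rw [hvsum]; ring]
    unfold pvPairs
    rw [← hk]
    exact (pick_eq ft 0 t (st - pvSumMin ft t).toNat (by omega)).symm
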